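-- pv_equiv track=rewrite | github.com/AlessandroFormaggioni/argo_Metazoa | DE_pipeline/siRNA_readcount_x_sample.py | spot_doubles
-- ===== SOURCE A (Python) =====
-- import collections
--
-- def spot_doubles(dict4):
--         groups=[]
--         dict1=dict(dict4)
--         for b in list(dict1.values()):
--                 el=[k for k,v in dict1.items() if collections.Counter(v) == collections.Counter(b) ]
--                 for r in el:
--                         del dict1[r]
--                 if el:
--                         groups.append(el)
--         return groups
-- ===== SOURCE B (Python) =====
-- def spot_doubles(dict4):
--     groups = {}
--     for k, v in dict(dict4).items():
--         groups.setdefault(tuple(sorted(v)), []).append(k)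
--     return list(groups.values())
-- ===== Notes on version B (the rewrite author's own statement) =====
-- stated objective: faster
-- what changed: Replaces the quadratic scan-and-delete loop (which recomputes Counter comparisons of every remaining entry against every value) by a single pass that groups keys in an insertion-ordered dict keyed by the sorted value, emitting the groups in the same first-occurrence order.
import Mathlib
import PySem

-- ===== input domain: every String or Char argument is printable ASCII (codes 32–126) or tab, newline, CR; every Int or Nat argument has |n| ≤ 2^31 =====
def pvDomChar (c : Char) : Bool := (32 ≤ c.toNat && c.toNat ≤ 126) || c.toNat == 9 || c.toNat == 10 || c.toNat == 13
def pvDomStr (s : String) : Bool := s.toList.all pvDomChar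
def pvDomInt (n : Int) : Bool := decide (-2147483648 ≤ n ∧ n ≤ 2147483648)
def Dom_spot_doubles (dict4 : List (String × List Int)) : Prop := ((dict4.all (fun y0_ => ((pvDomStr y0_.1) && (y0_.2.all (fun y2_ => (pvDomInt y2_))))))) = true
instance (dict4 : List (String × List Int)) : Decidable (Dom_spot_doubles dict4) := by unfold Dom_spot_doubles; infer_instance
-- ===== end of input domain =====

-- B replaces A's quadratic scan-and-delete grouping by a single pass over the dict that
-- groups keys under their sorted value in an insertion-ordered dict (objective: faster).

-- ===== PORT A =====
-- 'collections.Counter(v) == collections.Counter(b)' (multiset equality of two int lists)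
-- is ported as List.isPerm, which is exact for that comparison.
def spot_doubles (dict4 : List (String × List Int)) : List (List String) :=
  let dict1 := PySem.Dict.ofList dict4
  let r := (dict1.values).foldl
    (fun (st : PySem.Dict String (List Int) × List (List String)) b =>
      let el := (st.1.items.filter (fun p => p.2.isPerm b)).map (fun p => p.1)
      let d' := el.foldl (fun d r => d.erase r) st.1
      if el = [] then (d', st.2) else (d', st.2 ++ [el]))
    (dict1, [])
  r.2

-- ===== PORT B =====
-- 'groups.setdefault(tuple(sorted(v)), []).append(k)' is exactly
-- 'groups[sorted(v)] = groups.get(sorted(v), []) + [k]', i.e. Dict.modify.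
def spot_doubles_alt (dict4 : List (String × List Int)) : List (List String) :=
  let groups := (PySem.Dict.ofList dict4).items.foldl
    (fun (g : PySem.Dict (List Int) (List String)) p =>
      g.modify (PySem.List.sorted p.2 (fun x => x) false) [] (fun ks => ks ++ [p.1]))
    PySem.Dict.empty
  groups.values

-- ===== PRECONDITION & SPEC =====
def Spec_spot_doubles (dict4 : List (String × List Int)) (out : List (List String)) : Prop := out = spot_doubles_alt dict4
instance (dict4 : List (String × List Int)) (out : List (List String)) : Decidable (Spec_spot_doubles dict4 out) := by unfold Spec_spot_doubles; infer_instance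

-- ===== CLAIM (what is proved, stated in full; the proofs are below) =====
def Claim_equal_spot_doubles : Prop := ∀ (dict4 : List (String × List Int)), Dom_spot_doubles dict4 → Spec_spot_doubles dict4 (spot_doubles dict4)

-- ===== LEMMAS AND PROOFS =====

-- Common specification: first-occurrence grouping of an association list by the
-- multiset of its values.
def pvG : List (String × List Int) → List (List String)
  | [] => []
  | (k, v) :: rest =>
      (k :: (rest.filter (fun p => p.2.isPerm v)).map (fun p => p.1)) ::
        pvG (rest.filter (fun p => !(p.2.isPerm v)))
termination_by l => l.length
decreasing_by
  simpa using Nat.lt_succ_of_le ((List.length_filter_le _ _).trans (by simp))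

-- A's loop, carried out on the items list.
def pvProcA : List (List Int) → List (String × List Int) → List (List String)
  | [], _ => []
  | b :: vs, l =>
      let el := (l.filter (fun p => p.2.isPerm b)).map (fun p => p.1)
      let l' := l.filter (fun p => !(p.2.isPerm b))
      if el = [] then pvProcA vs l' else el :: pvProcA vs l'

lemma pv_isPerm_comm (a b : List Int) : a.isPerm b = b.isPerm a := by
  cases h : List.isPerm a b
  · cases h' : List.isPerm b a
    · rfl
    · exact absurd (List.isPerm_iff.mpr (List.isPerm_iff.mp h').symm) (by simp [h])
  · exact (List.isPerm_iff.mpr (List.isPerm_iff.mp h).symm).symm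

lemma pv_isPerm_trans {a b c : List Int} (h1 : a.isPerm b) (h2 : b.isPerm c) :
    a.isPerm c = true :=
  List.isPerm_iff.mpr ((List.isPerm_iff.mp h1).trans (List.isPerm_iff.mp h2))

-- sorted(v) == sorted(b)  ↔  multiset equality
lemma pv_keyEq (a b : List Int) :
    ((PySem.List.sorted a (fun x => x) false == PySem.List.sorted b (fun x => x) false)) = a.isPerm b := by
  cases h : List.isPerm a b
  · have hnp : ¬ a.Perm b := fun hp => by simp [List.isPerm_iff.mpr hp] at h
    simpa [beq_iff_eq] using fun he => hnp ((PySem.List.sorted_id_eq_sorted_id_iff_perm _ _).mp he)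
  · simpa [beq_iff_eq] using (PySem.List.sorted_id_eq_sorted_id_iff_perm _ _).mpr (List.isPerm_iff.mp h)

-- ---------- A side ----------

lemma pv_eraseAll (el : List String) (d : PySem.Dict String (List Int)) :
    (el.foldl (fun d r => d.erase r) d).items
      = d.items.filter (fun p => !(el.contains p.1)) := by
  induction el generalizing d with
  | nil => simp
  | cons r el ih =>
      rw [List.foldl_cons, ih]
      simp only [PySem.Dict.erase, List.filter_filter]
      apply List.filter_congr
      intro p _
      by_cases h : p.1 = r <;> simp [h]

lemma pv_erase_step (d : PySem.Dict String (List Int)) (hnd : d.keys.Nodup) (b : List Int) :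
    (((d.items.filter (fun p => p.2.isPerm b)).map (fun p => p.1)).foldl
        (fun d r => d.erase r) d).items
      = d.items.filter (fun p => !(p.2.isPerm b)) := by
  rw [pv_eraseAll]
  apply List.filter_congr
  intro p hp
  congr 1
  cases h : (p.2.isPerm b)
  · -- p not in the class, so p.1 is not among the erased keys
    simp only [List.contains_eq_mem, decide_eq_false_iff_not, List.mem_map, List.mem_filter]
    rintro ⟨q, ⟨hq, hqb⟩, hfst⟩
    have hqp : q = p := List.inj_on_of_nodup_map hnd hq hp hfst
    rw [hqp] at hqb; simp [h] at hqb
  · simp only [List.contains_eq_mem, decide_eq_true_eq, List.mem_map]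
    exact ⟨p, List.mem_filter.mpr ⟨hp, h⟩, rfl⟩

lemma pv_nodup_filter_keys (d : PySem.Dict String (List Int)) (hnd : d.keys.Nodup)
    (q : String × List Int → Bool) :
    (PySem.Dict.mk (d.items.filter q)).keys.Nodup := by
  have hs : ((d.items.filter q).map (fun p => p.1)).Sublist (d.items.map (fun p => p.1)) :=
    List.Sublist.map _ List.filter_sublist
  exact hs.nodup hnd

lemma pv_foldA (vs : List (List Int)) (d : PySem.Dict String (List Int))
    (gs : List (List String)) (hnd : d.keys.Nodup) :
    (vs.foldl
      (fun (st : PySem.Dict String (List Int) × List (List String)) b =>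
        let el := (st.1.items.filter (fun p => p.2.isPerm b)).map (fun p => p.1)
        let d' := el.foldl (fun d r => d.erase r) st.1
        if el = [] then (d', st.2) else (d', st.2 ++ [el]))
      (d, gs)).2 = gs ++ pvProcA vs d.items := by
  induction vs generalizing d gs with
  | nil => simp [pvProcA]
  | cons b vs ih =>
      simp only [List.foldl_cons]
      have hd' : ((( d.items.filter (fun p => p.2.isPerm b)).map (fun p => p.1)).foldl
          (fun d r => d.erase r) d) = PySem.Dict.mk (d.items.filter (fun p => !(p.2.isPerm b))) := by
        apply PySem.Dict.ext; exact pv_erase_step d hnd b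
      have hnd' : (PySem.Dict.mk (d.items.filter (fun p => !(p.2.isPerm b)))).keys.Nodup :=
        pv_nodup_filter_keys d hnd _
      by_cases hel : ((d.items.filter (fun p => p.2.isPerm b)).map (fun p => p.1)) = []
      · rw [if_pos hel, hd', ih _ _ hnd']
        simp only [pvProcA]
        rw [if_pos hel]
      · rw [if_neg hel, hd', ih _ _ hnd']
        simp only [pvProcA]
        rw [if_neg hel]
        simp [List.append_assoc]

-- A's loop over the snapshot of all values, reduced to pvG: 'seen' collects the values
-- whose class has already been grouped; their entries are gone from the remaining list.
lemma pv_procA_G (suf : List (String × List Int)) (seen : List (List Int)) :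
    pvProcA (suf.map (fun p => p.2)) (suf.filter (fun p => seen.all (fun s => !(p.2.isPerm s))))
      = pvG (suf.filter (fun p => seen.all (fun s => !(p.2.isPerm s)))) := by
  induction suf generalizing seen with
  | nil => simp [pvProcA, pvG]
  | cons hd suf ih =>
      obtain ⟨k, v⟩ := hd
      have hrefl : v.isPerm v = true := List.isPerm_iff.mpr (List.Perm.refl v)
      by_cases hseen : (seen.all (fun s => !(v.isPerm s))) = true
      · -- v's class is new: the head survives the filter and is grouped now
        have hfil : (((⟨k, v⟩ : String × List Int) :: suf).filter
              (fun p => seen.all (fun s => !(p.2.isPerm s))))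
            = ⟨k, v⟩ :: suf.filter (fun p => seen.all (fun s => !(p.2.isPerm s))) := by
          simp [hseen]
        have hrest : (suf.filter (fun p => seen.all (fun s => !(p.2.isPerm s)))).filter
              (fun p => !(p.2.isPerm v))
            = suf.filter (fun p => (v :: seen).all (fun s => !(p.2.isPerm s))) := by
          rw [List.filter_filter]
          apply List.filter_congr
          intro p _
          simp [List.all_cons]
        rw [List.map_cons, hfil]
        simp only [pvProcA, pvG, List.filter_cons, hrefl, Bool.not_true, hrest]
        simp only [if_true, List.map_cons, Bool.false_eq_true, if_false]
        rw [if_neg (List.cons_ne_nil _ _), ih (v :: seen)]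
      · -- v's class was grouped before: the head is filtered away and its step is a no-op
        have hfil : (((⟨k, v⟩ : String × List Int) :: suf).filter
              (fun p => seen.all (fun s => !(p.2.isPerm s))))
            = suf.filter (fun p => seen.all (fun s => !(p.2.isPerm s))) := by
          simp only [List.filter_cons]
          rw [if_neg (by simpa using hseen)]
        -- no remaining entry matches v's class
        have hnomatch : (suf.filter (fun p => seen.all (fun s => !(p.2.isPerm s)))).filter
              (fun p => p.2.isPerm v) = [] := by
          rw [List.filter_eq_nil_iff]
          intro p hp
          obtain ⟨hps, hpseen⟩ := List.mem_filter.mp hp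
          intro hpv
          simp only [List.all_eq_true, Bool.not_eq_eq_eq_not, Bool.not_true] at hseen
          push_neg at hseen
          obtain ⟨s, hs, hvs⟩ := hseen
          have hvs' : v.isPerm s = true := by
            cases hq : (v.isPerm s)
            · exact absurd hq hvs
            · rfl
          have : p.2.isPerm s = true := pv_isPerm_trans hpv hvs'
          have := (List.all_eq_true.mp hpseen) s hs
          simp [‹p.2.isPerm s = true›] at this
        have hnochange : (suf.filter (fun p => seen.all (fun s => !(p.2.isPerm s)))).filter
              (fun p => !(p.2.isPerm v))
            = suf.filter (fun p => seen.all (fun s => !(p.2.isPerm s))) := by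
          apply List.filter_eq_self.mpr
          intro p hp
          cases hpv : (p.2.isPerm v)
          · simp
          · exact absurd hpv (by simpa using List.filter_eq_nil_iff.mp hnomatch p hp)
        rw [List.map_cons, hfil]
        simp only [pvProcA]
        rw [hnomatch, hnochange]
        simpa using ih seen

-- ---------- B side ----------

lemma pv_set_add_cons {α : Type} [BEq α] [LawfulBEq α] (x : α) (s : List α) (y : α)
    (hy : (y == x) = false) : PySem.Set.add (x :: s) y = x :: PySem.Set.add s y := by
  simp only [PySem.Set.add, PySem.Set.contains, List.contains_cons, hy, Bool.false_or]
  by_cases h : y ∈ s <;> simp [h]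

lemma pv_foldl_add_cons {α : Type} [BEq α] [LawfulBEq α] (ys : List α) (x : α)
    (h : ∀ y ∈ ys, (y == x) = false) :
    ys.foldl PySem.Set.add [x] = x :: ys.foldl PySem.Set.add [] := by
  suffices H : ∀ (s : List α), ys.foldl PySem.Set.add (x :: s) = x :: ys.foldl PySem.Set.add s by
    exact H []
  induction ys with
  | nil => intro s; rfl
  | cons y ys ih =>
      intro s
      simp only [List.foldl_cons]
      rw [pv_set_add_cons x s y (h y (by simp))]
      exact ih (fun z hz => h z (by simp [hz])) _

lemma pv_foldl_add_filter {α : Type} [BEq α] [LawfulBEq α] (ys : List α) (x : α) (s : List α)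
    (hx : x ∈ s) :
    ys.foldl PySem.Set.add s = (ys.filter (fun y => !(y == x))).foldl PySem.Set.add s := by
  induction ys generalizing s with
  | nil => rfl
  | cons y ys ih =>
      simp only [List.foldl_cons, List.filter_cons]
      cases hyx : (y == x)
      · simp only [Bool.not_false, if_pos, List.foldl_cons]
        exact ih _ ((PySem.Set.mem_add s y x).mpr (Or.inl hx))
      · have hyx' : y = x := by simpa using hyx
        subst hyx'
        rw [if_neg (by simp)]
        have hadd : PySem.Set.add s y = s := by
          simp [PySem.Set.add, PySem.Set.contains, List.contains_eq_mem, hx]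
        rw [hadd]
        exact ih _ hx

lemma pv_ofList_cons {α : Type} [BEq α] [LawfulBEq α] (x : α) (xs : List α) :
    PySem.Set.ofList (x :: xs) = x :: PySem.Set.ofList (xs.filter (fun y => !(y == x))) := by
  rw [PySem.Set.ofList_eq_foldl, PySem.Set.ofList_eq_foldl]
  simp only [List.foldl_cons]
  have h0 : PySem.Set.add ([] : List α) x = [x] := rfl
  rw [h0, pv_foldl_add_filter xs x [x] (by simp)]
  exact pv_foldl_add_cons _ x (fun y hy => by simpa using (List.of_mem_filter hy))

-- the first-occurrence grouping map equals pvG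
lemma pv_B_groups_fuel (n : Nat) : ∀ (l : List (String × List Int)), l.length ≤ n →
    (PySem.Set.ofList (l.map (fun p => PySem.List.sorted p.2 (fun x => x) false))).map
        (fun c => (l.filter
          (fun p => PySem.List.sorted p.2 (fun x => x) false == c)).map (fun p => p.1))
      = pvG l := by
  induction n with
  | zero =>
      intro l hl
      have hnil : l = [] := List.eq_nil_of_length_eq_zero (Nat.le_zero.mp hl)
      subst hnil; simp [pvG]
  | succ n ih =>
      intro l hl
      match l with
      | [] => simp [pvG]
      | (k, v) :: rest =>
        rw [List.map_cons, pv_ofList_cons, List.map_cons]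
        have hfm : ((rest.map (fun p => PySem.List.sorted p.2 (fun x => x) false)).filter
              (fun y => !(y == PySem.List.sorted v (fun x => x) false)))
            = (rest.filter (fun p => !(p.2.isPerm v))).map
                (fun p => PySem.List.sorted p.2 (fun x => x) false) := by
          rw [List.filter_map]
          congr 1
          apply List.filter_congr
          intro p _
          simp only [Function.comp_apply, pv_keyEq]
        rw [hfm]
        -- head group
        have hhead : ((((k, v) :: rest).filter
              (fun p => PySem.List.sorted p.2 (fun x => x) false
                == PySem.List.sorted v (fun x => x) false)).map (fun p => p.1))
            = k :: (rest.filter (fun p => p.2.isPerm v)).map (fun p => p.1) := by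
          rw [List.filter_cons]
          rw [if_pos (by rw [pv_keyEq]; exact List.isPerm_iff.mpr (List.Perm.refl v))]
          rw [List.map_cons]
          congr 2
          apply List.filter_congr
          intro p _
          exact pv_keyEq p.2 v
        -- tail groups: classes other than v's ignore the head and the removed class
        have htail : ∀ c ∈ PySem.Set.ofList ((rest.filter (fun p => !(p.2.isPerm v))).map
              (fun p => PySem.List.sorted p.2 (fun x => x) false)),
            (((k, v) :: rest).filter
                (fun p => PySem.List.sorted p.2 (fun x => x) false == c)).map (fun p => p.1)
              = ((rest.filter (fun p => !(p.2.isPerm v))).filter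
                (fun p => PySem.List.sorted p.2 (fun x => x) false == c)).map (fun p => p.1) := by
          intro c hc
          obtain ⟨p0, hp0, hp0c⟩ := List.mem_map.mp ((PySem.Set.mem_ofList _ c).mp hc)
          obtain ⟨hp0r, hp0v⟩ := List.mem_filter.mp hp0
          have hcv : (PySem.List.sorted v (fun x => x) false == c) = false := by
            rw [← hp0c, pv_keyEq]
            cases hq : (v.isPerm p0.2)
            · rfl
            · rw [pv_isPerm_comm] at hq; simp [hq] at hp0v
          rw [List.filter_cons, if_neg (by simp [hcv])]
          congr 1
          rw [List.filter_filter]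
          apply List.filter_congr
          intro p _
          cases hpc : (PySem.List.sorted p.2 (fun x => x) false == c)
          · simp
          · have hpe : PySem.List.sorted p.2 (fun x => x) false = c := by simpa using hpc
            have hpv : (p.2.isPerm v) = false := by
              rw [← pv_keyEq, hpe]
              cases hq : (c == PySem.List.sorted v (fun x => x) false)
              · rfl
              · have hce : c = PySem.List.sorted v (fun x => x) false := by simpa using hq
                rw [hce] at hcv; simp at hcv
            simp [hpv]
        rw [List.map_congr_left htail,
          ih (rest.filter (fun p => !(p.2.isPerm v)))
            ((List.length_filter_le _ _).trans (by simpa using Nat.lt_succ_iff.mp hl))]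
        simp only [pvG]
        rw [hhead]

lemma pv_B_groups (l : List (String × List Int)) :
    (PySem.Set.ofList (l.map (fun p => PySem.List.sorted p.2 (fun x => x) false))).map
        (fun c => (l.filter
          (fun p => PySem.List.sorted p.2 (fun x => x) false == c)).map (fun p => p.1))
      = pvG l :=
  pv_B_groups_fuel l.length l (le_refl _)

-- B's output equals the first-occurrence grouping map
lemma pv_B_eq (dict4 : List (String × List Int)) :
    spot_doubles_alt dict4
      = (PySem.Set.ofList (((PySem.Dict.ofList dict4).items).map
            (fun p => PySem.List.sorted p.2 (fun x => x) false))).map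
          (fun c => (((PySem.Dict.ofList dict4).items).filter
            (fun p => PySem.List.sorted p.2 (fun x => x) false == c)).map (fun p => p.1)) := by
  unfold spot_doubles_alt
  set l := (PySem.Dict.ofList dict4).items with hl
  have hfold : l.foldl
      (fun (g : PySem.Dict (List Int) (List String)) p =>
        g.modify (PySem.List.sorted p.2 (fun x => x) false) [] (fun ks => ks ++ [p.1]))
      PySem.Dict.empty
    = (l.map (fun p => (PySem.List.sorted p.2 (fun x => x) false, p.1))).foldl
      (fun (g : PySem.Dict (List Int) (List String)) q =>
        g.modify q.1 [] (fun ks => ks ++ [q.2]))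
      PySem.Dict.empty := by
    rw [List.foldl_map]
  have hnd : (l.foldl
      (fun (g : PySem.Dict (List Int) (List String)) p =>
        g.modify (PySem.List.sorted p.2 (fun x => x) false) [] (fun ks => ks ++ [p.1]))
      PySem.Dict.empty).keys.Nodup := by
    have := PySem.Dict.nodup_keys_foldl_modify_key l
      (fun p => PySem.List.sorted p.2 (fun x => x) false) []
      (fun _ p => fun ks => ks ++ [p.1]) PySem.Dict.empty (by simp)
    simpa using this
  rw [PySem.Dict.values_eq_map_keys _ hnd []]
  have hkeys : (l.foldl
      (fun (g : PySem.Dict (List Int) (List String)) p =>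
        g.modify (PySem.List.sorted p.2 (fun x => x) false) [] (fun ks => ks ++ [p.1]))
      PySem.Dict.empty).keys
      = PySem.Set.ofList (l.map (fun p => PySem.List.sorted p.2 (fun x => x) false)) := by
    have := PySem.Dict.keys_foldl_modify_key l
      (fun p => PySem.List.sorted p.2 (fun x => x) false) []
      (fun _ p => fun ks => ks ++ [p.1]) PySem.Dict.empty
    simp only [PySem.Dict.keys_empty] at this
    rw [this]
    rw [PySem.Set.ofList_eq_foldl]
    rfl
  rw [hkeys]
  apply List.map_congr_left
  intro c _
  rw [hfold, PySem.Dict.getD_foldl_modify_append, PySem.Dict.getD_empty]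
  rw [List.filter_map, List.map_map]
  simp [Function.comp_def]

-- ===== VERDICT (by name: the statement is the Claim_ definition above) =====
theorem spot_doubles_spec : Claim_equal_spot_doubles := by
  intro dict4 _
  unfold Spec_spot_doubles
  rw [pv_B_eq, pv_B_groups]
  unfold spot_doubles
  simp only []
  have hnd : (PySem.Dict.ofList dict4).keys.Nodup := PySem.Dict.nodup_keys_ofList dict4
  rw [show (PySem.Dict.ofList dict4).values
      = ((PySem.Dict.ofList dict4).items).map (fun p => p.2) from rfl]
  rw [pv_foldA _ _ _ hnd]
  have := pv_procA_G ((PySem.Dict.ofList dict4).items) []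
  simpa using this
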